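-- pv_equiv track=rewrite | github.com/arpityadav526/ChurnGuard | src/dashboard/api.py | get_feature_group
-- ===== SOURCE A (Python) =====
-- REQUIRED_COLUMNS = [
--     "gender",
--     "SeniorCitizen",
--     "Partner",
--     "Dependents",
--     "tenure",
--     "PhoneService",
--     "MultipleLines",
--     "InternetService",
--     "OnlineSecurity",
--     "OnlineBackup",
--     "DeviceProtection",
--     "TechSupport",
--     "StreamingTV",
--     "StreamingMovies",
--     "Contract",
--     "PaperlessBilling",
--     "PaymentMethod",
--     "MonthlyCharges",
--     "TotalCharges",
-- ]
--
-- ENGINEERED_COLUMNS = [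
--     "AvgMonthlySpend",
--     "TenureGroup",
--     "TotalServices",
--     "ContractRisk",
-- ]
--
-- def get_feature_group(feature_name: str) -> str:
--     all_groups = REQUIRED_COLUMNS + ENGINEERED_COLUMNS
--
--     for col in all_groups:
--         if feature_name == col:
--             return col
--         if feature_name.startswith(f"{col}_"):
--             return col
--
--     # handle one-hot tenure group names explicitly
--     if feature_name.startswith("TenureGroup_"):
--         return "TenureGroup"
--
--     return feature_name
-- ===== SOURCE B (Python) =====
-- _ALL_GROUPS = frozenset([
--     "gender", "SeniorCitizen", "Partner", "Dependents", "tenure",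
--     "PhoneService", "MultipleLines", "InternetService", "OnlineSecurity",
--     "OnlineBackup", "DeviceProtection", "TechSupport", "StreamingTV",
--     "StreamingMovies", "Contract", "PaperlessBilling", "PaymentMethod",
--     "MonthlyCharges", "TotalCharges",
--     "AvgMonthlySpend", "TenureGroup", "TotalServices", "ContractRisk",
-- ])
--
-- def get_feature_group(feature_name: str) -> str:
--     i = feature_name.find('_')
--     key = feature_name if i < 0 else feature_name[:i]
--     return key if key in _ALL_GROUPS else feature_name
-- ===== Notes on version B (the rewrite author's own statement) =====
-- stated objective: simpler
-- what changed: B replaces A's scan over all 23 column names (testing exact match and 'col_' prefix, plus a redundant TenureGroup_ branch) with a single key derivation (the text before the first underscore) and one frozenset membership test.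
import Mathlib
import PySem

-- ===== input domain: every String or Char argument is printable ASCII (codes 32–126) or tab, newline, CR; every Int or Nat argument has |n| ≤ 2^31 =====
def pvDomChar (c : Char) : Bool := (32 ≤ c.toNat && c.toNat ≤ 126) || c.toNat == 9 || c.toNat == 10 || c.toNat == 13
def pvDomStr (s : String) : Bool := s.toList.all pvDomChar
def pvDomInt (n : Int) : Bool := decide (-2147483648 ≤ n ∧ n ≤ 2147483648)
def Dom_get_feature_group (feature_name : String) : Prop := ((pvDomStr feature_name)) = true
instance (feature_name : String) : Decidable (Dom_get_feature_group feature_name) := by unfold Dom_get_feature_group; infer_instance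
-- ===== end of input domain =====

-- B (simpler): instead of A's scan over all 23 column names testing equality / "col_" prefix,
-- B derives the text before the first '_' once and does a single set-membership test.

-- ===== PORT A =====
def pvRequiredColumns : List String :=
  ["gender", "SeniorCitizen", "Partner", "Dependents", "tenure",
   "PhoneService", "MultipleLines", "InternetService", "OnlineSecurity",
   "OnlineBackup", "DeviceProtection", "TechSupport", "StreamingTV",
   "StreamingMovies", "Contract", "PaperlessBilling", "PaymentMethod",
   "MonthlyCharges", "TotalCharges"]

def pvEngineeredColumns : List String :=
  ["AvgMonthlySpend", "TenureGroup", "TotalServices", "ContractRisk"]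

-- the for-loop over all_groups; String.ofList (col.toList ++ ['_']) is the f-string f"{col}_" (exact concatenation)
def pvGroupLoop (feature_name : String) : List String → String
  | [] =>
      if PySem.Str.startswith feature_name "TenureGroup_" then "TenureGroup"
      else feature_name
  | col :: rest =>
      if feature_name == col then col
      else if PySem.Str.startswith feature_name (String.ofList (col.toList ++ ['_'])) then col
      else pvGroupLoop feature_name rest

def get_feature_group (feature_name : String) : String :=
  pvGroupLoop feature_name (pvRequiredColumns ++ pvEngineeredColumns)

-- ===== PORT B =====
def pvAllGroups : PySem.Set String :=
  PySem.Set.ofList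
    ["gender", "SeniorCitizen", "Partner", "Dependents", "tenure",
     "PhoneService", "MultipleLines", "InternetService", "OnlineSecurity",
     "OnlineBackup", "DeviceProtection", "TechSupport", "StreamingTV",
     "StreamingMovies", "Contract", "PaperlessBilling", "PaymentMethod",
     "MonthlyCharges", "TotalCharges",
     "AvgMonthlySpend", "TenureGroup", "TotalServices", "ContractRisk"]

def get_feature_group_alt (feature_name : String) : String :=
  let i : Int := PySem.Str.find feature_name "_"
  let key : String :=
    if i < 0 then feature_name
    else String.ofList (PySem.List.slice feature_name.toList none (some i))
  if key ∈ pvAllGroups then key else feature_name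

-- ===== PRECONDITION & SPEC =====
def Spec_get_feature_group (feature_name : String) (out : String) : Prop := out = get_feature_group_alt feature_name
instance (feature_name : String) (out : String) : Decidable (Spec_get_feature_group feature_name out) := by unfold Spec_get_feature_group; infer_instance

-- ===== CLAIM (what is proved, stated in full; the proofs are below) =====
def Claim_equal_get_feature_group : Prop := ∀ (feature_name : String), Dom_get_feature_group feature_name → Spec_get_feature_group feature_name (get_feature_group feature_name)

-- ===== LEMMAS AND PROOFS =====

theorem pv_ofList_eq_iff (l : List Char) (s : String) : String.ofList l = s ↔ l = s.toList := by
  constructor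
  · intro h; simpa using congrArg String.toList h
  · intro h; subst h; simp

theorem pv_singleton_prefix {cs : List Char} {i : Nat} (h : i < cs.length) :
    (['_'] <+: cs.drop i) ↔ cs[i] = '_' := by
  rw [List.drop_eq_getElem_cons h, List.cons_prefix_cons]
  simp [eq_comm]

-- B's key (the text before the first '_') is takeWhile (· ≠ '_')
theorem pv_key_eq (cs : List Char) :
    (if PySem.Chars.find cs ['_'] < 0 then cs
     else PySem.List.slice cs none (some (PySem.Chars.find cs ['_']))) =
      cs.takeWhile (· ≠ '_') := by
  by_cases h : PySem.Chars.find cs ['_'] < 0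
  · rw [if_pos h]
    symm
    rw [List.takeWhile_eq_self_iff]
    have hni : ¬ (['_'] <:+: cs) := by
      rw [← PySem.Chars.find_nonneg_iff]; omega
    intro x hx
    simp only [ne_eq, decide_eq_true_eq]
    rintro rfl
    obtain ⟨s1, s2, rfl⟩ := List.append_of_mem hx
    exact hni ⟨s1, s2, by simp⟩
  · rw [if_neg h]
    have hne : PySem.Chars.find cs ['_'] ≠ -1 := by omega
    have hspec := PySem.Chars.findFrom_natCast_spec cs ['_'] 0 (Nat.zero_le _)
    rw [show ((0 : Nat) : Int) = (0 : Int) by norm_num, PySem.Chars.findFrom_zero] at hspec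
    obtain ⟨-, hpre, hmin⟩ := hspec hne
    set n : Nat := (PySem.Chars.find cs ['_']).toNat with hn
    obtain ⟨t, ht⟩ := hpre
    have hlt : n < cs.length := by
      have := congrArg List.length ht
      simp [List.length_drop] at this
      omega
    rw [show PySem.Chars.find cs ['_'] = ((n : Nat) : Int) by omega, PySem.List.slice_to_natCast]
    have hall : ∀ x ∈ cs.take n, (fun x => decide (x ≠ '_')) x = true := by
      intro x hx
      obtain ⟨i, hilen, hxi⟩ := List.mem_iff_getElem.1 hx
      have hi1 : i < n := by simp at hilen; omega
      have hi2 : i < cs.length := by omega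
      have hmi := hmin i (Nat.zero_le i) hi1
      rw [pv_singleton_prefix hi2] at hmi
      have hxe : x = cs[i] := by rw [← hxi]; exact List.getElem_take
      simp [hxe]
      exact hmi
    conv_rhs => rw [← List.take_append_drop n cs, ← ht]
    rw [show ['_'] ++ t = '_' :: t from rfl, List.takeWhile_append]
    rw [List.takeWhile_eq_self_iff.2 hall]
    simp

-- A's two tests for a column (exact match or "col_" prefix) succeed iff the key equals the column
theorem pv_match (cs p : List Char) (hp : '_' ∉ p) :
    (cs = p ∨ (p ++ ['_']) <+: cs) ↔ cs.takeWhile (· ≠ '_') = p := by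
  have hself : List.takeWhile (fun x => decide (x ≠ '_')) p = p := by
    rw [List.takeWhile_eq_self_iff]
    intro x hx
    simp only [ne_eq, decide_eq_true_eq]
    rintro rfl; exact hp hx
  constructor
  · rintro (rfl | ⟨t, ht⟩)
    · exact hself
    · rw [← ht, List.append_assoc, show ['_'] ++ t = '_' :: t from rfl, List.takeWhile_append]
      rw [hself]
      simp
  · intro h
    have hd := List.takeWhile_append_dropWhile (p := fun x => decide (x ≠ '_')) (l := cs)
    rw [h] at hd
    cases hdw : List.dropWhile (fun x => decide (x ≠ '_')) cs with
    | nil => left; rw [← hd, hdw]; simp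
    | cons c t =>
        right
        have hc : c = '_' := by
          have hh := List.head?_dropWhile_not (fun x => decide (x ≠ '_')) cs
          rw [hdw] at hh
          simpa using hh
        exact ⟨t, by rw [← hd, hdw, hc]; simp⟩

-- A's loop over a list of '_'-free column names, characterised by the key
theorem pv_loop (f : String) (cols : List String) (h : ∀ c ∈ cols, '_' ∉ c.toList) :
    pvGroupLoop f cols =
      if String.ofList (f.toList.takeWhile (· ≠ '_')) ∈ cols
      then String.ofList (f.toList.takeWhile (· ≠ '_'))
      else if PySem.Str.startswith f "TenureGroup_" then "TenureGroup" else f := by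
  induction cols with
  | nil => simp [pvGroupLoop]
  | cons c rest ih =>
    have hc := h c (by simp)
    have hrest : ∀ x ∈ rest, '_' ∉ x.toList := fun x hx => h x (by simp [hx])
    by_cases hk : f.toList.takeWhile (· ≠ '_') = c.toList
    · have hdisj := (pv_match f.toList c.toList hc).2 hk
      have hkc : String.ofList (f.toList.takeWhile (· ≠ '_')) = c := by
        rw [pv_ofList_eq_iff]; exact hk
      rw [if_pos (by rw [hkc]; exact List.mem_cons_self), hkc]
      show pvGroupLoop f (c :: rest) = c
      rcases hdisj with heq | hpre
      · have hfc : f = c := by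
          have := congrArg String.ofList heq
          simpa using this
        simp [pvGroupLoop, hfc]
      · by_cases hfc : f = c
        · simp [pvGroupLoop, hfc]
        · have hsw : PySem.Str.startswith f (String.ofList (c.toList ++ ['_'])) = true := by
            rw [PySem.Str.startswith_eq, PySem.Chars.startswith_iff]
            simpa using hpre
          have hne1 : ¬ (f == c) = true := by simp [hfc]
          show (if f == c then c
                else if PySem.Str.startswith f (String.ofList (c.toList ++ ['_'])) then c
                else pvGroupLoop f rest) = c
          rw [if_neg hne1, if_pos hsw]
    · have hne1 : ¬ (f == c) = true := by
        simp only [beq_iff_eq]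
        intro hfc
        exact hk ((pv_match f.toList c.toList hc).1 (Or.inl (by rw [hfc])))
      have hne2 : ¬ PySem.Str.startswith f (String.ofList (c.toList ++ ['_'])) = true := by
        rw [PySem.Str.startswith_eq, PySem.Chars.startswith_iff]
        intro hpre
        exact hk ((pv_match f.toList c.toList hc).1 (Or.inr (by simpa using hpre)))
      have hkc : String.ofList (f.toList.takeWhile (· ≠ '_')) ≠ c :=
        fun he => hk ((pv_ofList_eq_iff _ _).1 he)
      show (if f == c then c else if PySem.Str.startswith f (String.ofList (c.toList ++ ['_'])) then c else pvGroupLoop f rest) = _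
      rw [if_neg hne1, if_neg hne2, ih hrest]
      by_cases hm : String.ofList (f.toList.takeWhile (· ≠ '_')) ∈ rest
      · rw [if_pos hm, if_pos (List.mem_cons_of_mem c hm)]
      · rw [if_neg hm, if_neg (show ¬ (String.ofList (f.toList.takeWhile (· ≠ '_')) ∈ c :: rest) by
          rw [List.mem_cons]; rintro (he | he)
          · exact hkc he
          · exact hm he)]

-- B rewritten by the key characterisation
theorem pv_alt_eq (f : String) :
    get_feature_group_alt f =
      (if String.ofList (f.toList.takeWhile (· ≠ '_')) ∈ pvAllGroups
       then String.ofList (f.toList.takeWhile (· ≠ '_')) else f) := by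
  unfold get_feature_group_alt
  simp only [PySem.Str.find_eq, show ("_" : String).toList = ['_'] from rfl]
  have hk := pv_key_eq f.toList
  by_cases h : PySem.Chars.find f.toList ['_'] < 0
  · rw [if_pos h] at hk ⊢
    rw [← hk]
    simp
  · rw [if_neg h] at hk ⊢
    rw [hk]

theorem pv_lists_eq : pvRequiredColumns ++ pvEngineeredColumns = pvAllGroups := by decide

-- ===== VERDICT (by name: the statement is the Claim_ definition above) =====
theorem get_feature_group_spec : Claim_equal_get_feature_group := by
  intro f _
  show get_feature_group f = get_feature_group_alt f
  unfold get_feature_group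
  rw [pv_loop f _ (by decide), pv_alt_eq, pv_lists_eq]
  by_cases hm : String.ofList (f.toList.takeWhile (· ≠ '_')) ∈ pvAllGroups
  · rw [if_pos hm, if_pos hm]
  · rw [if_neg hm, if_neg hm]
    have hts : ¬ PySem.Str.startswith f "TenureGroup_" = true := by
      rw [PySem.Str.startswith_eq, PySem.Chars.startswith_iff]
      intro hpre
      apply hm
      have hk := (pv_match f.toList ("TenureGroup" : String).toList (by decide)).1
        (Or.inr (by simpa using hpre))
      rw [show String.ofList (f.toList.takeWhile (· ≠ '_')) = "TenureGroup" from
        (pv_ofList_eq_iff _ _).2 hk]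
      decide
    rw [if_neg hts]
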